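-- pv_equiv track=rewrite | github.com/timointhebush/AlgorithmStudy | PROGRAMMERS/#1/[1차]뉴스클러스터링.py | make_set
-- ===== SOURCE A (Python) =====
-- def make_set(string):
--     multi_set = []
--     l = len(string)
--     for i in range(l - 1):
--         j = i + 1
--         tmp = string[i] + string[j]
--         if tmp.isalpha():
--             multi_set.append(tmp)
--     return multi_set
-- ===== SOURCE B (Python) =====
-- def make_set(string):
--     res = []
--     run = []
--     for ch in string:
--         if ch.isalpha():
--             run.append(ch)
--         else:
--             for a, b in zip(run, run[1:]):
--                 res.append(a + b)
--             run = []
--     for a, b in zip(run, run[1:]):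
--         res.append(a + b)
--     return res
-- ===== Notes on version B (the rewrite author's own statement) =====
-- stated objective: alternative
-- what changed: B replaces A's index loop with a per-pair two-char isalpha test by a run-based scan: it collects maximal runs of alphabetic characters (per-character isalpha) and emits each run's internal bigrams when the run closes.
import Mathlib
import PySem

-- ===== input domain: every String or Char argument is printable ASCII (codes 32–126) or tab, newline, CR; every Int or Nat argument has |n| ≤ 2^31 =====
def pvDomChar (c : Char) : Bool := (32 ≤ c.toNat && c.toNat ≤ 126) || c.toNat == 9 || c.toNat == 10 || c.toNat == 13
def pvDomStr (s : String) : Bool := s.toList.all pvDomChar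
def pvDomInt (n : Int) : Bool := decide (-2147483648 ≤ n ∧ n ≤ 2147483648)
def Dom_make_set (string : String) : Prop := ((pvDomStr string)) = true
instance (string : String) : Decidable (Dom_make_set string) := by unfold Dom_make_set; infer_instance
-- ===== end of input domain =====

-- B replaces A's index loop (two-char isalpha per adjacent pair) by a run-based scan that
-- collects maximal alphabetic runs and emits each run's internal bigrams; same cost, no speed claim.

-- ===== PORT A =====
-- literal port of A's index loop; string[i] is ported on the char list (always in range here)
def make_set (string : String) : List String :=
  let cs := string.toList
  let l : Int := PySem.Str.len string
  (PySem.List.pyRange 0 (l - 1) 1).foldl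
    (fun ms i =>
      let j := i + 1
      let tmp : List Char := [PySem.List.pyGetD cs i ' ', PySem.List.pyGetD cs j ' ']
      if PySem.Chars.strIsalpha tmp then ms ++ [String.ofList tmp] else ms)
    []

-- ===== PORT B =====
-- 'for a, b in zip(run, run[1:]): res.append(a + b)'
def pvRunBigrams (run : List Char) : List String :=
  (run.zip run.tail).map (fun p => String.ofList [p.1, p.2])

-- the scan: res = output so far, run = current alphabetic run, third arg = chars still to read
def pvAltLoop (res : List String) (run : List Char) : List Char → List String
  | [] => res ++ pvRunBigrams run
  | c :: rest =>
    if PySem.Chars.isalpha c then pvAltLoop res (run ++ [c]) rest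
    else pvAltLoop (res ++ pvRunBigrams run) [] rest

def make_set_alt (string : String) : List String :=
  pvAltLoop [] [] string.toList

-- ===== PRECONDITION & SPEC =====
def Spec_make_set (string : String) (out : List String) : Prop := out = make_set_alt string
instance (string : String) (out : List String) : Decidable (Spec_make_set string out) := by unfold Spec_make_set; infer_instance

-- ===== CLAIM (what is proved, stated in full; the proofs are below) =====
def Claim_equal_make_set : Prop := ∀ (string : String), Dom_make_set string → Spec_make_set string (make_set string)

-- ===== LEMMAS AND PROOFS =====

-- common spec: the alphabetic adjacent-pair bigrams of a char list, front to back
def pvPairs : List Char → List String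
  | a :: b :: rest =>
      (if PySem.Chars.isalpha a && PySem.Chars.isalpha b then [String.ofList [a, b]] else [])
        ++ pvPairs (b :: rest)
  | _ => []

theorem pvPairs_cons_not_alpha (c : Char) (l : List Char)
    (h : PySem.Chars.isalpha c = false) : pvPairs (c :: l) = pvPairs l := by
  cases l with
  | nil => rfl
  | cons d t => simp [pvPairs, h]

theorem pvZip_append_last (run : List Char) (c : Char) :
    (run ++ [c]).zip (run ++ [c]).tail
      = run.zip run.tail ++ (match run.getLast? with
          | some a => [(a, c)]
          | none => []) := by
  induction run with
  | nil => rfl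
  | cons a rs ih =>
    cases rs with
    | nil => rfl
    | cons b t =>
      simpa [List.zip, List.getLast?_cons_cons] using congrArg (List.cons (a, b)) ih

theorem pvRunBigrams_append (run : List Char) (c : Char) :
    pvRunBigrams (run ++ [c])
      = pvRunBigrams run ++ (match run.getLast? with
          | some a => [String.ofList [a, c]]
          | none => []) := by
  unfold pvRunBigrams
  rw [pvZip_append_last]
  cases h : run.getLast? <;> simp

theorem pvAltLoop_spec (l : List Char) : ∀ (res : List String) (run : List Char),
    (∀ c ∈ run, PySem.Chars.isalpha c = true) →
    pvAltLoop res run l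
      = res ++ pvRunBigrams run ++ (match run.getLast? with
          | some a => pvPairs (a :: l)
          | none => pvPairs l) := by
  induction l with
  | nil =>
    intro res run _
    cases h : run.getLast? <;> simp [pvAltLoop, pvPairs]
  | cons c rest ih =>
    intro res run hrun
    by_cases hc : PySem.Chars.isalpha c = true
    · have hall : ∀ x ∈ run ++ [c], PySem.Chars.isalpha x = true := by
        intro x hx
        rcases List.mem_append.1 hx with h | h
        · exact hrun x h
        · simp at h; subst h; exact hc
      rw [pvAltLoop, if_pos hc, ih res (run ++ [c]) hall]
      rw [pvRunBigrams_append]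
      cases h : run.getLast? with
      | none => simp
      | some a =>
        have ha : PySem.Chars.isalpha a = true :=
          hrun a (List.mem_of_getLast? h)
        simp [pvPairs, ha, hc]
    · have hc' : PySem.Chars.isalpha c = false := by simpa using hc
      rw [pvAltLoop, if_neg hc, ih (res ++ pvRunBigrams run) [] (by simp)]
      cases h : run.getLast? with
      | none => simp [pvRunBigrams, pvPairs_cons_not_alpha c rest hc']
      | some a =>
        have : pvPairs (a :: c :: rest) = pvPairs rest := by
          cases rest with
          | nil => simp [pvPairs, hc']
          | cons d t =>
            rw [show pvPairs (a :: c :: d :: t)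
                  = (if PySem.Chars.isalpha a && PySem.Chars.isalpha c
                      then [String.ofList [a, c]] else []) ++ pvPairs (c :: d :: t) from rfl]
            simp [hc', pvPairs_cons_not_alpha c (d :: t) hc']
        simp [pvRunBigrams, this]

theorem make_set_alt_eq_pvPairs (string : String) :
    make_set_alt string = pvPairs string.toList := by
  rw [make_set_alt, pvAltLoop_spec string.toList [] [] (by simp)]
  rfl

-- A's loop, after foldl_append_if and pyRange_one, reduced to natural indices
theorem pvA_nat (cs : List Char) :
    ((List.range (cs.length - 1)).filter
        (fun k => PySem.Chars.strIsalpha [cs.getD k ' ', cs.getD (k + 1) ' '])).map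
      (fun k => String.ofList [cs.getD k ' ', cs.getD (k + 1) ' '])
      = pvPairs cs := by
  induction cs with
  | nil => rfl
  | cons a tl ih =>
    cases tl with
    | nil => rfl
    | cons b rest =>
      have hlen : (a :: b :: rest).length - 1 = (b :: rest).length - 1 + 1 := by
        simp
      rw [hlen, List.range_succ_eq_map, List.filter_cons]
      simp only [List.getD_cons_zero, List.getD_cons_succ]
      split_ifs with h0
      · have hb : (PySem.Chars.isalpha a && PySem.Chars.isalpha b) = true := by
          simp [PySem.Chars.strIsalpha] at h0
          simp [h0.1, h0.2]
        rw [show pvPairs (a :: b :: rest)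
              = (if PySem.Chars.isalpha a && PySem.Chars.isalpha b
                  then [String.ofList [a, b]] else []) ++ pvPairs (b :: rest) from rfl,
          hb, if_pos rfl]
        simp only [List.map_cons, List.filter_map, List.map_map, List.singleton_append]
        refine congrArg (List.cons (String.ofList [a, b])) ?_
        simpa using ih
      · have hb : (PySem.Chars.isalpha a && PySem.Chars.isalpha b) = false := by
          cases ha : PySem.Chars.isalpha a <;> cases hcb : PySem.Chars.isalpha b <;>
            simp_all [PySem.Chars.strIsalpha]
        rw [show pvPairs (a :: b :: rest)
              = (if PySem.Chars.isalpha a && PySem.Chars.isalpha b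
                  then [String.ofList [a, b]] else []) ++ pvPairs (b :: rest) from rfl,
          hb, if_neg (by simp)]
        simp only [List.filter_map, List.map_map, List.nil_append]
        simpa using ih

theorem make_set_eq_pvPairs (string : String) :
    make_set string = pvPairs string.toList := by
  unfold make_set
  rw [PySem.List.foldl_append_if, PySem.Str.len_eq, PySem.List.pyRange_one]
  rw [List.filter_map, List.map_map]
  have hc : ((string.toList.length : Int) - 1 - 0).toNat = string.toList.length - 1 := by
    omega
  rw [hc]
  have : ∀ k : Nat,
      PySem.List.pyGetD string.toList ((0 : Int) + (k : Int)) ' ' = string.toList.getD k ' ' ∧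
      PySem.List.pyGetD string.toList ((0 : Int) + (k : Int) + 1) ' ' = string.toList.getD (k + 1) ' ' := by
    intro k
    constructor
    · simp [PySem.List.pyGetD_natCast]
    · have : ((0 : Int) + (k : Int) + 1) = ((k + 1 : Nat) : Int) := by push_cast; ring
      rw [this]; exact PySem.List.pyGetD_natCast string.toList (k + 1) ' '
  calc ([] : List String) ++
        ((List.range (string.toList.length - 1)).filter
            ((fun i => PySem.Chars.strIsalpha
                [PySem.List.pyGetD string.toList i ' ', PySem.List.pyGetD string.toList (i + 1) ' ']) ∘
              (fun k : Nat => (0 : Int) + (k : Int)))).map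
          ((fun i => String.ofList
              [PySem.List.pyGetD string.toList i ' ', PySem.List.pyGetD string.toList (i + 1) ' ']) ∘
            (fun k : Nat => (0 : Int) + (k : Int)))
      = ((List.range (string.toList.length - 1)).filter
            (fun k => PySem.Chars.strIsalpha
              [string.toList.getD k ' ', string.toList.getD (k + 1) ' '])).map
          (fun k => String.ofList [string.toList.getD k ' ', string.toList.getD (k + 1) ' ']) := by
        rw [List.nil_append]
        have hf : List.filter
              ((fun i => PySem.Chars.strIsalpha
                  [PySem.List.pyGetD string.toList i ' ', PySem.List.pyGetD string.toList (i + 1) ' ']) ∘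
                (fun k : Nat => (0 : Int) + (k : Int)))
              (List.range (string.toList.length - 1))
            = List.filter
              (fun k => PySem.Chars.strIsalpha
                [string.toList.getD k ' ', string.toList.getD (k + 1) ' '])
              (List.range (string.toList.length - 1)) :=
          List.filter_congr (fun k _ => by
            simp only [Function.comp_apply, (this k).1, (this k).2])
        rw [hf]
        exact List.map_congr_left
          (fun k _ => by simp only [Function.comp_apply, (this k).1, (this k).2])
    _ = pvPairs string.toList := pvA_nat string.toList

-- ===== VERDICT (by name: the statement is the Claim_ definition above) =====
theorem make_set_spec : Claim_equal_make_set := by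
  intro string _
  unfold Spec_make_set
  rw [make_set_eq_pvPairs, make_set_alt_eq_pvPairs]
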